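-- pv_equiv track=rewrite | github.com/victorlee115/kopos_connector | kopos_connector/install/install.py | get_major_version
-- ===== SOURCE A (Python) =====
-- def get_major_version(version: str | None) -> int:
--     if not version:
--         return 0
--
--     current = []
--     for char in str(version):
--         if char.isdigit():
--             current.append(char)
--             continue
--         if current:
--             break
--
--     return int("".join(current) or 0)
-- ===== SOURCE B (Python) =====
-- def get_major_version(version):
--     if not version:
--         return 0
--     s = str(version)
--     n = len(s)
--     i = 0
--     while i < n and not s[i].isdigit():
--         i += 1
--     j = i
--     while j < n and s[j].isdigit():
--         j += 1
--     return int(s[i:j] or 0)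
-- ===== Notes on version B (the rewrite author's own statement) =====
-- stated objective: alternative
-- what changed: Replaced the single stateful accumulator loop with break by a two-pointer scan: one index skips the non-digit prefix, a second extends over the digit run, and the answer is int() of the slice s[i:j].
import Mathlib
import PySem

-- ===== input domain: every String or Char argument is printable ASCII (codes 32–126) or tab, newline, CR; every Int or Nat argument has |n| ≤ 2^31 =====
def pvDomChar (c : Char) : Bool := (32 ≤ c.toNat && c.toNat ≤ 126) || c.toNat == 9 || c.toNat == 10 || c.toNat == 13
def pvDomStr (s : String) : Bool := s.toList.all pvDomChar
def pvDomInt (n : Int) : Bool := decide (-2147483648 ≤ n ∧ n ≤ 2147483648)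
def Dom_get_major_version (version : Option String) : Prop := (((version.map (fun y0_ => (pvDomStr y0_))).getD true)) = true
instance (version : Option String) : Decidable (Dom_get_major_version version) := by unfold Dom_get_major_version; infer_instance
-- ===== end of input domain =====

-- B replaces A's stateful accumulator-with-break loop by a two-pointer scan and a slice; return values only, no mutation.

-- ===== PORT A =====
-- the for-loop: collect consecutive digits into `cur`, break at the first non-digit once `cur` is nonempty
def pvLoopA (cs : List Char) (cur : List Char) : List Char :=
  match cs with
  | [] => cur
  | c :: rest =>
    if PySem.Chars.isdigit c then pvLoopA rest (cur ++ [c])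
    else if cur ≠ [] then cur
    else pvLoopA rest cur

def get_major_version (version : Option String) : Int :=
  match version with
  | none => 0
  | some s =>
    if s.toList = [] then 0            -- `if not version`
    else
      let current := pvLoopA s.toList []
      -- int("".join(current) or 0); on Dom `current` is a run of ASCII digits so ofChars? never fails
      if current = [] then 0 else (PySem.Int.ofChars? current).getD 0

-- ===== PORT B =====
-- `while i < n and not s[i].isdigit(): i += 1`
def pvScanNon (cs : List Char) (i : Nat) : Nat :=
  if h : i < cs.length then
    if PySem.Chars.isdigit cs[i] then i else pvScanNon cs (i + 1)
  else i
termination_by cs.length - i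

-- `while j < n and s[j].isdigit(): j += 1`
def pvScanDig (cs : List Char) (j : Nat) : Nat :=
  if h : j < cs.length then
    if PySem.Chars.isdigit cs[j] then pvScanDig cs (j + 1) else j
  else j
termination_by cs.length - j

def get_major_version_alt (version : Option String) : Int :=
  match version with
  | none => 0
  | some s =>
    if s.toList = [] then 0            -- `if not version`
    else
      let cs := s.toList
      let i := pvScanNon cs 0
      let j := pvScanDig cs i
      let digits := PySem.List.slice cs (some (i : Int)) (some (j : Int))   -- s[i:j]
      if digits = [] then 0 else (PySem.Int.ofChars? digits).getD 0

-- ===== PRECONDITION & SPEC =====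
def Spec_get_major_version (version : Option String) (out : Int) : Prop := out = get_major_version_alt version
instance (version : Option String) (out : Int) : Decidable (Spec_get_major_version version out) := by unfold Spec_get_major_version; infer_instance

-- ===== CLAIM (what is proved, stated in full; the proofs are below) =====
def Claim_equal_get_major_version : Prop := ∀ (version : Option String), Dom_get_major_version version → Spec_get_major_version version (get_major_version version)

-- ===== LEMMAS AND PROOFS =====

-- A's loop with a nonempty accumulator appends exactly the leading digit run
theorem pvLoopA_ne_nil (cs cur : List Char) (h : cur ≠ []) :
    pvLoopA cs cur = cur ++ cs.takeWhile PySem.Chars.isdigit := by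
  induction cs generalizing cur with
  | nil => simp [pvLoopA]
  | cons c rest ih =>
    by_cases hd : PySem.Chars.isdigit c
    · simp [pvLoopA, hd, ih (cur ++ [c]) (by simp)]
    · simp [pvLoopA, hd, h]

-- A's loop from an empty accumulator = the canonical "digit run after the non-digit prefix"
theorem pvLoopA_canon (cs : List Char) :
    pvLoopA cs [] =
      (cs.dropWhile (fun c => !PySem.Chars.isdigit c)).takeWhile PySem.Chars.isdigit := by
  induction cs with
  | nil => simp [pvLoopA]
  | cons c rest ih =>
    by_cases hd : PySem.Chars.isdigit c
    · simp [pvLoopA, hd, pvLoopA_ne_nil rest [c] (by simp)]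
    · simpa [pvLoopA, hd, List.dropWhile_cons] using ih

theorem pvScanNon_spec (cs : List Char) (i : Nat) (hi : i ≤ cs.length) :
    pvScanNon cs i = i + ((cs.drop i).takeWhile (fun c => !PySem.Chars.isdigit c)).length := by
  induction hn : cs.length - i generalizing i with
  | zero =>
    have : i = cs.length := by omega
    subst this
    simp [pvScanNon]
  | succ n ih =>
    have hlt : i < cs.length := by omega
    have hdrop : cs.drop i = cs[i] :: cs.drop (i + 1) :=
      List.drop_eq_getElem_cons hlt
    by_cases hd : PySem.Chars.isdigit cs[i]
    · rw [pvScanNon]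
      rw [dif_pos hlt, if_pos hd, hdrop, List.takeWhile_cons]
      simp [hd]
    · rw [pvScanNon]
      rw [dif_pos hlt, if_neg (by simp [hd])]
      rw [ih (i + 1) (by omega) (by omega), hdrop, List.takeWhile_cons]
      simp [hd]
      omega

theorem pvScanDig_spec (cs : List Char) (j : Nat) (hj : j ≤ cs.length) :
    pvScanDig cs j = j + ((cs.drop j).takeWhile PySem.Chars.isdigit).length := by
  induction hn : cs.length - j generalizing j with
  | zero =>
    have : j = cs.length := by omega
    subst this
    simp [pvScanDig]
  | succ n ih =>
    have hlt : j < cs.length := by omega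
    have hdrop : cs.drop j = cs[j] :: cs.drop (j + 1) :=
      List.drop_eq_getElem_cons hlt
    by_cases hd : PySem.Chars.isdigit cs[j]
    · rw [pvScanDig]
      rw [dif_pos hlt, if_pos hd]
      rw [ih (j + 1) (by omega) (by omega), hdrop, List.takeWhile_cons]
      simp [hd]
      omega
    · rw [pvScanDig]
      rw [dif_pos hlt, if_neg (by simp [hd]), hdrop, List.takeWhile_cons]
      simp [hd]

-- drop (length of the takeWhile prefix) = dropWhile
theorem drop_length_takeWhile {α : Type} (p : α → Bool) (l : List α) :
    l.drop (l.takeWhile p).length = l.dropWhile p := by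
  induction l with
  | nil => rfl
  | cons a l ih =>
    by_cases hp : p a
    · simpa [List.dropWhile_cons, hp] using ih
    · simp [List.dropWhile_cons, hp]

-- take (length of the takeWhile prefix) = takeWhile
theorem take_length_takeWhile {α : Type} (p : α → Bool) (l : List α) :
    l.take (l.takeWhile p).length = l.takeWhile p := by
  induction l with
  | nil => rfl
  | cons a l ih =>
    by_cases hp : p a
    · simpa [hp] using ih
    · simp [List.takeWhile_cons, hp]

-- B's slice equals the canonical digit run
theorem pvAlt_slice_canon (cs : List Char) :
    PySem.List.slice cs (some ((pvScanNon cs 0 : Nat) : Int)) (some ((pvScanDig cs (pvScanNon cs 0) : Nat) : Int)) =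
      (cs.dropWhile (fun c => !PySem.Chars.isdigit c)).takeWhile PySem.Chars.isdigit := by
  have hi : pvScanNon cs 0 = ((cs.takeWhile (fun c => !PySem.Chars.isdigit c)).length) := by
    simpa using pvScanNon_spec cs 0 (by omega)
  have hile : pvScanNon cs 0 ≤ cs.length := by
    rw [hi]; exact (List.takeWhile_prefix _).length_le
  have hdrop : cs.drop (pvScanNon cs 0) = cs.dropWhile (fun c => !PySem.Chars.isdigit c) := by
    rw [hi]; exact drop_length_takeWhile _ cs
  have hj : pvScanDig cs (pvScanNon cs 0) =
      pvScanNon cs 0 + ((cs.dropWhile (fun c => !PySem.Chars.isdigit c)).takeWhile PySem.Chars.isdigit).length := by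
    rw [pvScanDig_spec cs _ hile, hdrop]
  rw [PySem.List.slice_natCast, hj, hdrop]
  have : pvScanNon cs 0 + ((cs.dropWhile (fun c => !PySem.Chars.isdigit c)).takeWhile PySem.Chars.isdigit).length - pvScanNon cs 0
      = ((cs.dropWhile (fun c => !PySem.Chars.isdigit c)).takeWhile PySem.Chars.isdigit).length := by omega
  rw [this]
  exact take_length_takeWhile _ _

-- ===== VERDICT (by name: the statement is the Claim_ definition above) =====
theorem get_major_version_spec : Claim_equal_get_major_version := by
  intro version _
  unfold Spec_get_major_version
  match version with
  | none => rfl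
  | some s =>
    simp only [get_major_version, get_major_version_alt]
    by_cases hs : s.toList = []
    · simp [hs]
    · simp only [hs, pvLoopA_canon, pvAlt_slice_canon]
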